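-- pv_equiv track=rewrite | github.com/bymars/topcoder | srm671/BearDartsDiv2.py | count
-- ===== SOURCE A (Python) =====
-- def inc_c(arr, n, c):
--     found = 0
--     for i in range(len(arr)):
--         if arr[i][0] == n:
--             arr[i][1] += c
--             found = 1
--             break
--     if found == 0:
--         arr.append([n, c])
--
-- def inc(arr, n):
--     inc_c(arr, n, 1)
--
-- def dec(arr, n):
--     for i in range(len(arr)):
--         if arr[i][0] == n:
--             arr[i][1] -= 1
--             if arr[i][1] == 0:
--                 del(arr[i])
--             break
--
-- def find(arr, n):
--     for i in range(len(arr)):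
--         if arr[i][0] == n:
--             return i
--     return -1
--
-- def count(w):
--     l = len(w)
--     a_count = []
--     d_count = []
--     ab_count = []
--
--     res = 0
--     for i in range(2, l):
--         inc(d_count, w[i])
--
--     for c_pos in range(2, l - 1):
--         dec(d_count, w[c_pos])
--         inc(a_count, w[c_pos - 2])
--         b_pos = c_pos - 1
--         for i in range(len(a_count)):
--             inc_c(ab_count, w[b_pos] * a_count[i][0], a_count[i][1])
--         for i in range(len(d_count)):
--             if d_count[i][0] % w[c_pos] == 0:
--                 ab = d_count[i][0] // w[c_pos]
--                 j = find(ab_count, ab)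
--                 if j != -1:
--                     res += ab_count[j][1] * d_count[i][1]
--     return res
-- ===== SOURCE B (Python) =====
-- def count(w):
--     n = len(w)
--     res = 0
--     later = {}  # value -> count of occurrences among w[c+1:]
--     for c in range(n - 2, 1, -1):
--         later[w[c + 1]] = later.get(w[c + 1], 0) + 1
--         for a in range(c - 1):
--             for b in range(a + 1, c):
--                 res += later.get(w[a] * w[b] * w[c], 0)
--     return res
-- ===== Notes on version B (the rewrite author's own statement) =====
-- stated objective: simpler
-- what changed: A sweeps c ascending while maintaining three hand-rolled association-list counters (a_count, ab_count, d_count) with incremental pair-product bookkeeping and divisibility tests w[d]%w[c]==0; B sweeps c descending with a single suffix-count dict and, for each c, directly enumerates the pairs a<b<c and adds the count of w[a]*w[b]*w[c] among w[c+1:].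
import Mathlib
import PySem

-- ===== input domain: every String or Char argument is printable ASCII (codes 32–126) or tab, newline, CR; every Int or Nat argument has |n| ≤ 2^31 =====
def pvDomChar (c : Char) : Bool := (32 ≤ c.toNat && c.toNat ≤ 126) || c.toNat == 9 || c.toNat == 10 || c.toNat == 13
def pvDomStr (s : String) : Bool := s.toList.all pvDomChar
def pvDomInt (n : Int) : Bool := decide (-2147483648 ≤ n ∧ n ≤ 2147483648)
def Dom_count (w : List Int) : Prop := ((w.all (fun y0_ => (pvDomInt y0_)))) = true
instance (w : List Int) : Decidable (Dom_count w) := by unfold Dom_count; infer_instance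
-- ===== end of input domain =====

-- B replaces A's three maintained association-list counters and divisibility matching by a
-- descending sweep with one suffix-count dictionary and direct pair enumeration (objective: simpler).

-- ===== PORT A =====
def inc_c : List (Int × Int) → Int → Int → List (Int × Int)
  | [], n, c => [(n, c)]
  | p :: t, n, c => if p.1 = n then (p.1, p.2 + c) :: t else p :: inc_c t n c

def inc (arr : List (Int × Int)) (n : Int) : List (Int × Int) := inc_c arr n 1

def dec : List (Int × Int) → Int → List (Int × Int)
  | [], _ => []
  | p :: t, n => if p.1 = n then (if p.2 - 1 = 0 then t else (p.1, p.2 - 1) :: t) else p :: dec t n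

def find : List (Int × Int) → Int → Int
  | [], _ => -1
  | p :: t, n => if p.1 = n then 0 else (if find t n = -1 then -1 else find t n + 1)

def countStep (w : List Int) (st : List (Int × Int) × List (Int × Int) × List (Int × Int) × Int)
    (c : Int) : List (Int × Int) × List (Int × Int) × List (Int × Int) × Int :=
  let d_count := dec st.2.2.1 (PySem.List.pyGetD w c 0)
  let a_count := inc st.1 (PySem.List.pyGetD w (c - 2) 0)
  let wb := PySem.List.pyGetD w (c - 1) 0
  let ab_count := a_count.foldl (fun ab p => inc_c ab (wb * p.1) p.2) st.2.1
  let res := d_count.foldl (fun r p =>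
      if PySem.Int.mod p.1 (PySem.List.pyGetD w c 0) = 0 then
        let ab := PySem.Int.floordiv p.1 (PySem.List.pyGetD w c 0)
        let j := find ab_count ab
        if j ≠ -1 then r + (PySem.List.pyGetD ab_count j (0, 0)).2 * p.2 else r
      else r) st.2.2.2
  (a_count, ab_count, d_count, res)

def count (w : List Int) : Int :=
  let l : Int := PySem.List.len w
  let d_count := (PySem.List.pyRange 2 l 1).foldl (fun d i => inc d (PySem.List.pyGetD w i 0)) []
  let st := (PySem.List.pyRange 2 (l - 1) 1).foldl (countStep w) ([], [], d_count, 0)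
  st.2.2.2

-- ===== PORT B =====
def stepB (w : List Int) (st : PySem.Dict Int Int × Int) (c : Int) : PySem.Dict Int Int × Int :=
  let later := st.1.insert (PySem.List.pyGetD w (c + 1) 0) (st.1.getD (PySem.List.pyGetD w (c + 1) 0) 0 + 1)
  let res := (PySem.List.pyRange 0 (c - 1) 1).foldl (fun r a =>
      (PySem.List.pyRange (a + 1) c 1).foldl (fun r b =>
          r + later.getD (PySem.List.pyGetD w a 0 * PySem.List.pyGetD w b 0 * PySem.List.pyGetD w c 0) 0) r) st.2
  (later, res)

def count_alt (w : List Int) : Int :=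
  let n : Int := PySem.List.len w
  let st := (PySem.List.pyRange (n - 2) 1 (-1)).foldl (stepB w) (PySem.Dict.empty, 0)
  st.2

-- ===== PRECONDITION & SPEC =====
-- Pre_ excludes exactly the inputs on which A raises ZeroDivisionError: a zero among w[2:len(w)-1].
def Pre_count (w : List Int) : Prop := ∀ x ∈ (w.drop 2).dropLast, x ≠ 0
instance (w : List Int) : Decidable (Pre_count w) := by unfold Pre_count; infer_instance

def pvWitness_count : List Int := [1, 2, 3, 6]

def Spec_count (w : List Int) (out : Int) : Prop := out = count_alt w
instance (w : List Int) (out : Int) : Decidable (Spec_count w out) := by unfold Spec_count; infer_instance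

-- ===== CLAIM (what is proved, stated in full; the proofs are below) =====
def Claim_equal_count : Prop := ∀ (w : List Int), Dom_count w → Pre_count w → Spec_count w (count w)

-- ===== LEMMAS AND PROOFS =====

-- `look arr v`: the count an association-list counter stores for key v (0 if absent).
def look : List (Int × Int) → Int → Int
  | [], _ => 0
  | p :: t, v => if p.1 = v then p.2 else look t v

-- well-formedness of A's counters: distinct keys, positive counts
def Good (arr : List (Int × Int)) : Prop :=
  (arr.map Prod.fst).Nodup ∧ ∀ p ∈ arr, 0 < p.2

theorem look_eq_zero_of_not_mem {arr : List (Int × Int)} {v : Int}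
    (h : v ∉ arr.map Prod.fst) : look arr v = 0 := by
  induction arr with
  | nil => rfl
  | cons p t ih =>
    simp only [List.map_cons, List.mem_cons, not_or] at h
    simp [look, Ne.symm h.1, ih h.2]

theorem look_inc_c (arr : List (Int × Int)) (n c v : Int) :
    look (inc_c arr n c) v = look arr v + (if v = n then c else 0) := by
  induction arr with
  | nil => by_cases h : v = n <;> simp [inc_c, look, h, Ne.symm] <;> simp_all [eq_comm]
  | cons p t ih =>
    by_cases h : p.1 = n
    · by_cases hv : p.1 = v <;> simp [inc_c, look, h, hv] <;> simp_all [eq_comm] <;> omega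
    · by_cases hv : p.1 = v
      · have : v ≠ n := by rw [← hv]; exact h
        simp [inc_c, look, h, hv, this]
      · simp [inc_c, look, h, hv, ih]

theorem keys_inc_c (arr : List (Int × Int)) (n c : Int) :
    (inc_c arr n c).map Prod.fst =
      if n ∈ arr.map Prod.fst then arr.map Prod.fst else arr.map Prod.fst ++ [n] := by
  induction arr with
  | nil => simp [inc_c]
  | cons p t ih =>
    by_cases h : p.1 = n
    · simp [inc_c, h]
    · have h' : ¬ n = p.1 := fun hc => h hc.symm
      simp only [inc_c, if_neg h, List.map_cons, List.mem_cons, h', false_or, ih]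
      by_cases hm : n ∈ t.map Prod.fst <;> simp [hm]

theorem pos_inc_c {n c : Int} (hc : 0 < c) :
    ∀ (arr : List (Int × Int)), (∀ p ∈ arr, 0 < p.2) → ∀ p ∈ inc_c arr n c, 0 < p.2 := by
  intro arr
  induction arr with
  | nil => intro _ p hp; simp [inc_c] at hp; simp [hp, hc]
  | cons q t ih =>
    intro hpos p hp
    by_cases h : q.1 = n
    · simp only [inc_c, if_pos h, List.mem_cons] at hp
      rcases hp with hp | hp
      · have := hpos q (by simp); simp [hp]; omega
      · exact hpos p (by simp [hp])
    · simp only [inc_c, if_neg h, List.mem_cons] at hp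
      rcases hp with hp | hp
      · exact hpos p (by simp [hp])
      · exact ih (fun r hr => hpos r (by simp [hr])) p hp

theorem good_inc_c {arr : List (Int × Int)} {n c : Int} (hG : Good arr) (hc : 0 < c) :
    Good (inc_c arr n c) := by
  obtain ⟨hnd, hpos⟩ := hG
  constructor
  · rw [keys_inc_c]
    by_cases hm : n ∈ arr.map Prod.fst
    · simpa [hm] using hnd
    · rw [if_neg hm]
      refine List.Nodup.append hnd (by simp) ?_
      simp [List.disjoint_singleton, hm]
  · exact pos_inc_c hc arr hpos

theorem good_fold_inc_c {A : List (Int × Int)} (hA : ∀ p ∈ A, 0 < p.2) :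
    ∀ {ab : List (Int × Int)}, Good ab → (wb : Int) →
      Good (A.foldl (fun ab p => inc_c ab (wb * p.1) p.2) ab) := by
  induction A with
  | nil => intro ab h wb; simpa
  | cons q t ih =>
    intro ab h wb
    simp only [List.foldl_cons]
    exact ih (fun p hp => hA p (by simp [hp])) (good_inc_c h (hA q (by simp))) wb

theorem look_fold_inc_c (wb t : Int) :
    ∀ (A ab : List (Int × Int)),
      look (A.foldl (fun ab p => inc_c ab (wb * p.1) p.2) ab) t =
        look ab t + (A.map (fun p => (if t = wb * p.1 then (1 : Int) else 0) * p.2)).sum := by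
  intro A
  induction A with
  | nil => simp
  | cons q tl ih =>
    intro ab
    simp only [List.foldl_cons, ih, look_inc_c, List.map_cons, List.sum_cons]
    by_cases h : t = wb * q.1 <;> simp [h] <;> ring

theorem dec_cons (p : Int × Int) (t : List (Int × Int)) (n : Int) :
    dec (p :: t) n = if p.1 = n then (if p.2 - 1 = 0 then t else (p.1, p.2 - 1) :: t)
      else p :: dec t n := rfl

theorem keys_dec (n : Int) : ∀ (arr : List (Int × Int)),
    ∀ v ∈ (dec arr n).map Prod.fst, v ∈ arr.map Prod.fst := by
  intro arr
  induction arr with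
  | nil => simp [dec]
  | cons p t ih =>
    intro v hv
    rw [dec_cons] at hv
    by_cases h : p.1 = n
    · rw [if_pos h] at hv
      by_cases h2 : p.2 - 1 = 0
      · rw [if_pos h2] at hv; simp at hv ⊢; tauto
      · rw [if_neg h2] at hv; simp at hv ⊢; tauto
    · rw [if_neg h] at hv
      simp only [List.map_cons, List.mem_cons] at hv ⊢
      rcases hv with hv | hv
      · left; exact hv
      · right; exact ih v hv

theorem good_dec {n : Int} : ∀ {arr : List (Int × Int)}, Good arr → Good (dec arr n) := by
  intro arr
  induction arr with
  | nil => intro _; exact ⟨by simp [dec], by simp [dec]⟩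
  | cons p t ih =>
    intro ⟨hnd, hpos⟩
    have hndt : (t.map Prod.fst).Nodup := by simpa using hnd.sublist (List.sublist_cons_self _ _)
    have hpost : ∀ q ∈ t, 0 < q.2 := fun q hq => hpos q (by simp [hq])
    rw [dec_cons]
    by_cases h : p.1 = n
    · rw [if_pos h]
      by_cases h2 : p.2 - 1 = 0
      · rw [if_pos h2]; exact ⟨hndt, hpost⟩
      · rw [if_neg h2]
        refine ⟨by simpa using hnd, ?_⟩
        intro q hq
        rcases List.mem_cons.mp hq with hq | hq
        · have := hpos p (by simp); simp [hq]; omega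
        · exact hpost q hq
    · rw [if_neg h]
      obtain ⟨ih1, ih2⟩ := ih ⟨hndt, hpost⟩
      refine ⟨?_, ?_⟩
      · simp only [List.map_cons, List.nodup_cons]
        refine ⟨fun hc => ?_, ih1⟩
        have := keys_dec n t _ hc
        simp only [List.map_cons, List.nodup_cons] at hnd
        exact hnd.1 this
      · intro q hq
        rcases List.mem_cons.mp hq with hq | hq
        · exact hpos q (by simp [hq])
        · exact ih2 q hq

theorem look_dec {n : Int} : ∀ (arr : List (Int × Int)),
    (arr.map Prod.fst).Nodup → 1 ≤ look arr n →
    ∀ v, look (dec arr n) v = look arr v - (if v = n then 1 else 0) := by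
  intro arr
  induction arr with
  | nil => intro _ h1; simp [look] at h1
  | cons p t ih =>
    intro hnd h1 v
    have hndt : (t.map Prod.fst).Nodup := by simpa using hnd.sublist (List.sublist_cons_self _ _)
    rw [dec_cons]
    by_cases h : p.1 = n
    · rw [if_pos h]
      have hnmem : n ∉ t.map Prod.fst := by
        simp only [List.map_cons, List.nodup_cons] at hnd; rw [← h]; exact hnd.1
      by_cases h2 : p.2 - 1 = 0
      · rw [if_pos h2]
        by_cases hv : v = n
        · rw [hv, look_eq_zero_of_not_mem hnmem]
          have hl : look (p :: t) n = p.2 := by simp [look, h]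
          simp [hl]; omega
        · have hpv : p.1 ≠ v := by rw [h]; exact fun hc => hv hc.symm
          simp [look, hpv, hv]
      · rw [if_neg h2]
        by_cases hv : v = n
        · have hpv : p.1 = v := by rw [h, hv]
          simp [look, hpv, hv]
        · have hpv : p.1 ≠ v := by rw [h]; exact fun hc => hv hc.symm
          simp [look, hpv, hv]
    · rw [if_neg h]
      have hpn : p.1 ≠ n := h
      have h1' : 1 ≤ look t n := by simpa [look, hpn] using h1
      by_cases hv : p.1 = v
      · have hvn : v ≠ n := by rw [← hv]; exact h
        simp [look, hv, hvn]
      · simp [look, hv, ih hndt h1']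

-- count as an Int-valued indicator sum
theorem count_int (L : List Int) (v : Int) :
    ((L.count v : Nat) : Int) = (L.map (fun t => if t = v then (1 : Int) else 0)).sum := by
  induction L with
  | nil => simp
  | cons x t ih =>
    by_cases h : x = v
    · subst h
      rw [List.count_cons_self]
      simp only [List.map_cons, List.sum_cons, if_pos rfl]
      push_cast
      rw [ih]; ring
    · rw [List.count_cons_of_ne h]
      simp [h, ih]

-- splitting a sum over a list by an equality predicate
theorem sum_map_split_eq (L : List Int) (k : Int) (g : Int → Int) :
    (L.map g).sum = g k * (L.count k : Nat) + ((L.filter (fun x => x ≠ k)).map g).sum := by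
  induction L with
  | nil => simp
  | cons x t ih =>
    by_cases h : x = k
    · subst h
      rw [List.count_cons_self]
      have hfc : (x :: t).filter (fun y => y ≠ x) = t.filter (fun y => y ≠ x) := by simp
      rw [hfc, List.map_cons, List.sum_cons, ih]
      push_cast; ring
    · rw [List.count_cons_of_ne h]
      have hfc : (x :: t).filter (fun y => y ≠ k) = x :: t.filter (fun y => y ≠ k) := by
        simp [h]
      rw [hfc, List.map_cons, List.sum_cons, List.map_cons, List.sum_cons, ih]
      ring

-- the central counter lemma: an entry-weighted sum over a Good counter representing list L
-- is the plain sum of g over L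
theorem entry_sum (g : Int → Int) :
    ∀ (arr : List (Int × Int)) (L : List Int), Good arr →
      (∀ v, look arr v = (L.count v : Nat)) →
      (arr.map (fun p => g p.1 * p.2)).sum = (L.map g).sum := by
  intro arr
  induction arr with
  | nil =>
    intro L _ h
    cases L with
    | nil => simp
    | cons x t =>
      exfalso
      have hx := (h x).symm
      simp only [look] at hx
      norm_cast at hx
      have : 0 < (x :: t).count x := List.count_pos_iff.mpr (by simp)
      omega
  | cons p t ih =>
    intro L hG h
    obtain ⟨hnd, hpos⟩ := hG
    have hndt : (t.map Prod.fst).Nodup := by simpa using hnd.sublist (List.sublist_cons_self _ _)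
    have hpmem : p.1 ∉ t.map Prod.fst := by
      simp only [List.map_cons, List.nodup_cons] at hnd; exact hnd.1
    have hlookp : look (p :: t) p.1 = p.2 := by simp [look]
    have hcnt : (L.count p.1 : Int) = p.2 := by rw [← h p.1, hlookp]
    have ht : ∀ v, look t v = ((L.filter (fun x => x ≠ p.1)).count v : Nat) := by
      intro v
      by_cases hv : v = p.1
      · rw [hv, look_eq_zero_of_not_mem hpmem]
        have h0 : (L.filter (fun x => x ≠ p.1)).count p.1 = 0 := by
          rw [List.count_eq_zero]
          intro hc
          have := (List.mem_filter.mp hc).2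
          simp at this
        rw [h0]; simp
      · have hstep : look (p :: t) v = look t v := by
          have : p.1 ≠ v := fun hc => hv hc.symm
          simp [look, this]
        rw [← hstep, h v]
        congr 1
        rw [List.count_filter (by simpa using hv)]
    rw [List.map_cons, List.sum_cons, sum_map_split_eq L p.1 g,
      ih (L.filter (fun x => x ≠ p.1)) ⟨hndt, fun q hq => hpos q (by simp [hq])⟩ ht, ← hcnt]

theorem find_ge (v : Int) : ∀ (arr : List (Int × Int)), -1 ≤ find arr v := by
  intro arr
  induction arr with
  | nil => simp [find]
  | cons p t ih =>
    by_cases h : p.1 = v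
    · simp [find, h]
    · by_cases h2 : find t v = -1 <;> simp [find, h, h2] <;> omega

-- find + index = look
theorem find_spec (v : Int) : ∀ (arr : List (Int × Int)),
    find arr v = -1 ∨
      (0 ≤ find arr v ∧ PySem.List.pyGetD arr (find arr v) (0, 0) = (v, look arr v)) := by
  intro arr
  induction arr with
  | nil => left; rfl
  | cons p t ih =>
    by_cases h : p.1 = v
    · right
      have hf : find (p :: t) v = 0 := by simp [find, h]
      rw [hf]
      refine ⟨le_refl 0, ?_⟩
      rw [PySem.List.pyGetD_zero_cons]
      have : look (p :: t) v = p.2 := by simp [look, h]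
      rw [this, ← h]
    · rcases ih with ih | ⟨ih0, ih1⟩
      · left; simp [find, h, ih]
      · right
        have hne : find t v ≠ -1 := by omega
        have hf : find (p :: t) v = find t v + 1 := by simp [find, h, hne]
        have hl : look (p :: t) v = look t v := by simp [look, h]
        obtain ⟨m, hm⟩ : ∃ m : Nat, find t v = (m : Int) := ⟨(find t v).toNat, by omega⟩
        rw [hf, hl, hm]
        refine ⟨by omega, ?_⟩
        have hcast : ((m : Int) + 1) = ((m + 1 : Nat) : Int) := by push_cast; ring
        rw [hcast, PySem.List.pyGetD_natCast]
        rw [hm, PySem.List.pyGetD_natCast] at ih1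
        simpa using ih1

theorem find_eq_neg_one_iff (v : Int) : ∀ (arr : List (Int × Int)),
    find arr v = -1 ↔ v ∉ arr.map Prod.fst := by
  intro arr
  induction arr with
  | nil => simp [find]
  | cons p t ih =>
    by_cases h : p.1 = v
    · simp [find, h]
    · have h' : ¬ v = p.1 := fun hc => h hc.symm
      by_cases h2 : find t v = -1
      · simp [find, h, h2, h', ih.mp h2]
      · have : v ∈ t.map Prod.fst := by
          by_contra hc
          exact h2 (ih.mpr hc)
        have hne : find (p :: t) v ≠ -1 := by
          have := find_ge v t
          simp [find, h, h2]
          omega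
        simp only [List.map_cons, List.mem_cons]
        constructor
        · intro hc; exact absurd hc hne
        · intro hc; exfalso; exact hc (Or.inr this)

-- w.drop k and w.take k as maps over ranges
theorem drop_eq_map_range (w : List Int) (k : Nat) :
    w.drop k = (List.range (w.length - k)).map (fun i => w.getD (k + i) 0) := by
  apply List.ext_getElem
  · simp
  · intro i h1 h2
    simp only [List.getElem_drop, List.getElem_map, List.getElem_range]
    rw [List.getD_eq_getElem]

theorem take_eq_map_range (w : List Int) (k : Nat) (hk : k ≤ w.length) :
    w.take k = (List.range k).map (fun i => w.getD i 0) := by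
  apply List.ext_getElem
  · simp; omega
  · intro i h1 h2
    simp only [List.getElem_take, List.getElem_map, List.getElem_range]
    rw [List.getD_eq_getElem]

-- initial d_count
theorem init_d_count (w : List Int) :
    ∀ (xs : List Int) (d : List (Int × Int)), Good d →
      Good (xs.foldl (fun d x => inc d x) d) ∧
      ∀ v, look (xs.foldl (fun d x => inc d x) d) v = look d v + (xs.count v : Nat) := by
  intro xs
  induction xs with
  | nil => intro d hG; simpa using hG
  | cons x t ih =>
    intro d hG
    obtain ⟨ih1, ih2⟩ := ih (inc d x) (good_inc_c hG (by norm_num))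
    refine ⟨ih1, fun v => ?_⟩
    rw [List.foldl_cons, ih2 v, inc, look_inc_c]
    by_cases h : v = x
    · subst h
      rw [List.count_cons_self, if_pos rfl]
      push_cast; ring
    · rw [List.count_cons_of_ne (fun hc => h hc.symm), if_neg h]
      push_cast; ring

-- the pair-product list A's ab_count represents after the update at step c
def pairsL (w : List Int) (c : Nat) : List Int :=
  (List.range c).flatMap (fun b => (List.range b).map (fun a => w.getD b 0 * w.getD a 0))

-- the value A's res gains at step c (c = c_pos)
def FdivL (w : List Int) (c : Nat) : Int :=
  ((w.drop (c + 1)).map (fun x =>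
    if PySem.Int.mod x (w.getD c 0) = 0 then
      (((pairsL w c).count (PySem.Int.floordiv x (w.getD c 0)) : Nat) : Int)
    else 0)).sum

-- the value B's res gains at step c
def FmulL (w : List Int) (c : Nat) : Int :=
  ((List.range (c - 1)).map (fun a =>
    ((List.range (c - 1 - a)).map (fun i =>
      (((w.drop (c + 1)).count (w.getD a 0 * w.getD (a + 1 + i) 0 * w.getD c 0) : Nat) : Int))).sum)).sum

-- A-side loop invariant
def StInv (w : List Int) (j : Nat)
    (st : List (Int × Int) × List (Int × Int) × List (Int × Int) × Int) : Prop :=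
  Good st.1 ∧ Good st.2.1 ∧ Good st.2.2.1 ∧
  (∀ v, look st.1 v = ((w.take j).count v : Nat)) ∧
  (∀ t, look st.2.1 t = ((pairsL w (j + 1)).count t : Nat)) ∧
  (∀ v, look st.2.2.1 v = ((w.drop (j + 2)).count v : Nat)) ∧
  st.2.2.2 = ((List.range j).map (fun i => FdivL w (2 + i))).sum

theorem pairsL_succ (w : List Int) (k : Nat) :
    pairsL w (k + 1) = pairsL w k ++ (List.range k).map (fun a => w.getD k 0 * w.getD a 0) := by
  unfold pairsL
  rw [List.range_succ, List.flatMap_append]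
  simp

theorem countStep_inv (w : List Int) (j : Nat)
    (st : List (Int × Int) × List (Int × Int) × List (Int × Int) × Int) (hj : j + 4 ≤ w.length)
    (h : StInv w j st) : StInv w (j + 1) (countStep w st ((2 : Int) + (j : Int))) := by
  obtain ⟨hGA, hGAB, hGD, hA, hAB, hD, hres⟩ := h
  have hjlen : j < w.length := by omega
  have hj1 : j + 1 < w.length := by omega
  have hj2 : j + 2 < w.length := by omega
  have e0 : PySem.List.pyGetD w ((2:Int)+(j:Int)) 0 = w.getD (j+2) 0 := by
    have e : ((2:Int)+(j:Int)) = ((j+2 : Nat) : Int) := by push_cast; ring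
    rw [e, PySem.List.pyGetD_natCast]
  have e2 : PySem.List.pyGetD w ((2:Int)+(j:Int) - 2) 0 = w.getD j 0 := by
    have e : ((2:Int)+(j:Int) - 2) = ((j : Nat) : Int) := by push_cast; ring
    rw [e, PySem.List.pyGetD_natCast]
  have e1 : PySem.List.pyGetD w ((2:Int)+(j:Int) - 1) 0 = w.getD (j+1) 0 := by
    have e : ((2:Int)+(j:Int) - 1) = ((j+1 : Nat) : Int) := by push_cast; ring
    rw [e, PySem.List.pyGetD_natCast]
  -- the d-counter after dec
  have hgetD2 : w.getD (j+2) 0 = w[j+2] := List.getD_eq_getElem w 0 hj2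
  have hDcons : w.drop (j+2) = w[j+2] :: w.drop (j+3) := List.drop_eq_getElem_cons hj2
  have hlook1 : 1 ≤ look st.2.2.1 (w.getD (j+2) 0) := by
    rw [hD, hDcons, hgetD2, List.count_cons_self]
    push_cast; omega
  have hGD' : Good (dec st.2.2.1 (w.getD (j+2) 0)) := good_dec ⟨hGD.1, hGD.2⟩
  have hD' : ∀ v, look (dec st.2.2.1 (w.getD (j+2) 0)) v = ((w.drop (j+3)).count v : Nat) := by
    intro v
    rw [look_dec st.2.2.1 hGD.1 hlook1 v, hD v, hDcons]
    by_cases hv : v = w[j+2]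
    · rw [hv, List.count_cons_self, if_pos (by rw [hgetD2])]
      push_cast; ring
    · rw [List.count_cons_of_ne (fun hc => hv hc.symm), if_neg (by rw [hgetD2]; exact hv)]
      push_cast; ring
  -- the a-counter after inc
  have hGA' : Good (inc st.1 (w.getD j 0)) := good_inc_c ⟨hGA.1, hGA.2⟩ (by norm_num)
  have htake : w.take (j+1) = w.take j ++ [w[j]] := by
    rw [List.take_succ]
    simp [List.getElem?_eq_getElem hjlen]
  have hA' : ∀ v, look (inc st.1 (w.getD j 0)) v = ((w.take (j+1)).count v : Nat) := by
    intro v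
    rw [inc, look_inc_c, hA v, htake, List.count_append]
    have hgj : w.getD j 0 = w[j] := List.getD_eq_getElem w 0 hjlen
    by_cases hv : v = w[j]
    · have hone : [w[j]].count v = 1 := by rw [hv]; simp
      rw [if_pos (by rw [hgj]; exact hv), hone]
      push_cast; ring
    · rw [if_neg (by rw [hgj]; exact hv)]
      have : [w[j]].count v = 0 := by
        rw [List.count_eq_zero]; simp [hv]
      rw [this]
      push_cast; ring
  -- the ab-counter after the fold
  have hGAB' : Good ((inc st.1 (w.getD j 0)).foldl
      (fun ab p => inc_c ab (w.getD (j+1) 0 * p.1) p.2) st.2.1) :=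
    good_fold_inc_c hGA'.2 ⟨hGAB.1, hGAB.2⟩ (w.getD (j+1) 0)
  have hAB' : ∀ t, look ((inc st.1 (w.getD j 0)).foldl
      (fun ab p => inc_c ab (w.getD (j+1) 0 * p.1) p.2) st.2.1) t =
      ((pairsL w (j+2)).count t : Nat) := by
    intro t
    rw [look_fold_inc_c, hAB t,
      entry_sum (fun v => if t = w.getD (j+1) 0 * v then (1:Int) else 0) _ _ hGA' hA']
    have hp2 : pairsL w (j+2) = pairsL w (j+1) ++
        (List.range (j+1)).map (fun a => w.getD (j+1) 0 * w.getD a 0) := pairsL_succ w (j+1)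
    rw [hp2, List.count_append]
    push_cast
    rw [count_int ((List.range (j+1)).map (fun a => w.getD (j+1) 0 * w.getD a 0)) t,
      take_eq_map_range w (j+1) (le_of_lt hj1), List.map_map, List.map_map]
    congr 1
    refine congrArg List.sum ?_
    apply List.map_congr_left
    intro a _
    simp only [Function.comp]
    by_cases hv : t = w.getD (j+1) 0 * w.getD a 0
    · rw [if_pos hv, if_pos hv.symm]
    · rw [if_neg hv, if_neg (fun hc => hv hc.symm)]
  -- the res fold
  set AB' := (inc st.1 (w.getD j 0)).foldl
      (fun ab p => inc_c ab (w.getD (j+1) 0 * p.1) p.2) st.2.1 with hABdef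
  set D' := dec st.2.2.1 (w.getD (j+2) 0) with hDdef
  have hbody : ∀ (r : Int) (p : Int × Int),
      (if PySem.Int.mod p.1 (w.getD (j+2) 0) = 0 then
        let ab := PySem.Int.floordiv p.1 (w.getD (j+2) 0)
        let jj := find AB' ab
        if jj ≠ -1 then r + (PySem.List.pyGetD AB' jj (0, 0)).2 * p.2 else r
      else r) =
      r + (if PySem.Int.mod p.1 (w.getD (j+2) 0) = 0 then
              look AB' (PySem.Int.floordiv p.1 (w.getD (j+2) 0)) else 0) * p.2 := by
    intro r p
    by_cases hm : PySem.Int.mod p.1 (w.getD (j+2) 0) = 0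
    · rw [if_pos hm, if_pos hm]
      set q := PySem.Int.floordiv p.1 (w.getD (j+2) 0) with hq
      show (if find AB' q ≠ -1 then r + (PySem.List.pyGetD AB' (find AB' q) (0, 0)).2 * p.2 else r)
          = r + look AB' q * p.2
      rcases find_spec q AB' with hf | ⟨hf0, hf1⟩
      · rw [if_neg (by simp [hf])]
        have : look AB' q = 0 := look_eq_zero_of_not_mem ((find_eq_neg_one_iff q AB').mp hf)
        rw [this]; ring
      · have hne : find AB' q ≠ -1 := by omega
        rw [if_pos hne, hf1]
    · rw [if_neg hm, if_neg hm]; ring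
  have hres' : (D'.foldl (fun r p =>
      if PySem.Int.mod p.1 (w.getD (j+2) 0) = 0 then
        let ab := PySem.Int.floordiv p.1 (w.getD (j+2) 0)
        let jj := find AB' ab
        if jj ≠ -1 then r + (PySem.List.pyGetD AB' jj (0, 0)).2 * p.2 else r
      else r) st.2.2.2) = st.2.2.2 + FdivL w (j+2) := by
    have step1 : (D'.foldl (fun r p =>
        if PySem.Int.mod p.1 (w.getD (j+2) 0) = 0 then
          let ab := PySem.Int.floordiv p.1 (w.getD (j+2) 0)
          let jj := find AB' ab
          if jj ≠ -1 then r + (PySem.List.pyGetD AB' jj (0, 0)).2 * p.2 else r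
        else r) st.2.2.2) = (D'.foldl (fun r p =>
        r + (if PySem.Int.mod p.1 (w.getD (j+2) 0) = 0 then
              look AB' (PySem.Int.floordiv p.1 (w.getD (j+2) 0)) else 0) * p.2) st.2.2.2) :=
      PySem.List.foldl_congr_mem _ _ _ _ (fun r p _ => hbody r p)
    rw [step1]
    rw [PySem.List.foldl_add (g := fun p : Int × Int =>
        (if PySem.Int.mod p.1 (w.getD (j+2) 0) = 0 then
          look AB' (PySem.Int.floordiv p.1 (w.getD (j+2) 0)) else 0) * p.2)]
    rw [entry_sum (fun v => if PySem.Int.mod v (w.getD (j+2) 0) = 0 then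
          look AB' (PySem.Int.floordiv v (w.getD (j+2) 0)) else 0) D' (w.drop (j+3)) hGD' hD']
    unfold FdivL
    congr 1
    apply congrArg
    apply List.map_congr_left
    intro x _
    by_cases hm : PySem.Int.mod x (w.getD (j+2) 0) = 0
    · rw [if_pos hm, if_pos hm, hAB']
    · rw [if_neg hm, if_neg hm]
  -- assemble
  refine ⟨?_, ?_, ?_, ?_, ?_, ?_, ?_⟩ <;>
    simp only [countStep, e0, e1, e2]
  · exact hGA'
  · exact hGAB'
  · exact hGD'
  · exact hA'
  · exact hAB'
  · exact hD'
  · rw [hres', hres, List.range_succ, List.map_append, List.sum_append]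
    simp [Nat.add_comm 2 j]

theorem stinv_zero (w : List Int) :
    StInv w 0 ([], [],
      (PySem.List.pyRange 2 (PySem.List.len w) 1).foldl
        (fun d i => inc d (PySem.List.pyGetD w i 0)) [], 0) := by
  have hlen : (PySem.List.len w - 2).toNat = w.length - 2 := by
    rw [PySem.List.len_eq]; omega
  have hfold : (PySem.List.pyRange 2 (PySem.List.len w) 1).foldl
      (fun d i => inc d (PySem.List.pyGetD w i 0)) [] =
      (w.drop 2).foldl (fun d x => inc d x) [] := by
    rw [PySem.List.pyRange_one, hlen, drop_eq_map_range w 2]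
    simp only [List.foldl_map]
    apply PySem.List.foldl_congr_mem
    intro d k _
    have e : (2 : Int) + (k : Int) = ((2 + k : Nat) : Int) := by push_cast; ring
    rw [e, PySem.List.pyGetD_natCast]
  obtain ⟨hG, hlook⟩ := init_d_count w (w.drop 2) [] ⟨by simp, by simp⟩
  refine ⟨⟨by simp, by simp⟩, ⟨by simp, by simp⟩, by rw [hfold]; exact hG, ?_, ?_, ?_, by simp⟩
  · intro v; simp [look]
  · intro t
    have : pairsL w 1 = [] := by unfold pairsL; simp [List.range_succ]
    simp [look, this]
  · intro v
    rw [hfold, hlook v]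
    simp [look]

theorem stinv_all (w : List Int) (init : List (Int × Int) × List (Int × Int) × List (Int × Int) × Int)
    (h0 : StInv w 0 init) :
    ∀ j, j ≤ w.length - 3 →
      StInv w j ((PySem.List.pyRange 2 (2 + (j : Int)) 1).foldl (countStep w) init) := by
  intro j
  induction j with
  | zero =>
    intro _
    rw [PySem.List.pyRange_one_eq_nil (by norm_num)]
    simpa using h0
  | succ m ih =>
    intro hm
    have hm' : m ≤ w.length - 3 := by omega
    have hlen : m + 4 ≤ w.length := by omega
    have hsplit : PySem.List.pyRange 2 (2 + ((m + 1 : Nat) : Int)) 1 =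
        PySem.List.pyRange 2 (2 + (m : Int)) 1 ++ [2 + (m : Int)] := by
      have e : (2 : Int) + ((m + 1 : Nat) : Int) = (2 + (m : Int)) + 1 := by push_cast; ring
      rw [e, PySem.List.pyRange_one_succ_right (by omega)]
    rw [hsplit, List.foldl_append, List.foldl_cons, List.foldl_nil]
    exact countStep_inv w m _ hlen (ih hm')

theorem countA_eq (w : List Int) :
    count w = ((List.range (w.length - 3)).map (fun i => FdivL w (2 + i))).sum := by
  simp only [count]
  by_cases hn : 4 ≤ w.length
  · have hJ : 2 + ((w.length - 3 : Nat) : Int) = PySem.List.len w - 1 := by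
      rw [PySem.List.len_eq]; push_cast; omega
    have := stinv_all w _ (stinv_zero w) (w.length - 3) (le_refl _)
    rw [hJ] at this
    exact this.2.2.2.2.2.2
  · have h3 : w.length - 3 = 0 := by omega
    have hnil : PySem.List.pyRange 2 (PySem.List.len w - 1) 1 = [] := by
      apply PySem.List.pyRange_one_eq_nil
      rw [PySem.List.len_eq]; omega
    rw [hnil, h3]
    simp

theorem stepB_res (w : List Int) (later : PySem.Dict Int Int) (res : Int) (m : Nat)
    (hlater : ∀ v, later.getD v 0 = ((w.drop (m + 2)).count v : Int)) :
    ((PySem.List.pyRange 0 (((m + 1 : Nat) : Int) - 1) 1).foldl (fun r a =>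
      (PySem.List.pyRange (a + 1) ((m + 1 : Nat) : Int) 1).foldl (fun r b =>
        r + later.getD (PySem.List.pyGetD w a 0 * PySem.List.pyGetD w b 0 *
          PySem.List.pyGetD w ((m + 1 : Nat) : Int) 0) 0) r) res)
    = res + FmulL w (m + 1) := by
  have ec : (((m + 1 : Nat) : Int) - 1) = ((m : Nat) : Int) := by push_cast; ring
  rw [ec, PySem.List.pyRange_one]
  have et : (((m : Nat) : Int) - 0).toNat = m := by omega
  rw [et]
  simp only [List.foldl_map]
  have hbody : ∀ (r : Int) (k : Nat), k ∈ List.range m →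
      ((PySem.List.pyRange ((0 + (k : Int)) + 1) ((m + 1 : Nat) : Int) 1).foldl (fun r b =>
        r + later.getD (PySem.List.pyGetD w (0 + (k : Int)) 0 * PySem.List.pyGetD w b 0 *
          PySem.List.pyGetD w ((m + 1 : Nat) : Int) 0) 0) r) =
      r + ((List.range (m - k)).map (fun i =>
        ((w.drop (m + 2)).count (w.getD k 0 * w.getD (k + 1 + i) 0 * w.getD (m + 1) 0) : Int))).sum := by
    intro r k hk
    have hkm : k < m := List.mem_range.mp hk
    have e1 : ((0 : Int) + (k : Int)) + 1 = ((k + 1 : Nat) : Int) := by push_cast; ring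
    rw [e1, PySem.List.pyRange_one]
    have e2 : (((m + 1 : Nat) : Int) - ((k + 1 : Nat) : Int)).toNat = m - k := by omega
    rw [e2]
    simp only [List.foldl_map]
    rw [PySem.List.foldl_add (g := fun j : Nat =>
      later.getD (PySem.List.pyGetD w (0 + (k : Int)) 0 *
        PySem.List.pyGetD w (((k + 1 : Nat) : Int) + (j : Int)) 0 *
        PySem.List.pyGetD w ((m + 1 : Nat) : Int) 0) 0)]
    congr 1
    apply congrArg
    apply List.map_congr_left
    intro j _
    have ea : ((0 : Int) + (k : Int)) = ((k : Nat) : Int) := by push_cast; ring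
    have eb : (((k + 1 : Nat) : Int) + (j : Int)) = ((k + 1 + j : Nat) : Int) := by push_cast; ring
    rw [ea, eb, PySem.List.pyGetD_natCast, PySem.List.pyGetD_natCast,
      PySem.List.pyGetD_natCast, hlater]
  rw [PySem.List.foldl_congr_mem _ _ _ _ hbody]
  rw [PySem.List.foldl_add (g := fun k : Nat =>
    ((List.range (m - k)).map (fun i =>
      ((w.drop (m + 2)).count (w.getD k 0 * w.getD (k + 1 + i) 0 * w.getD (m + 1) 0) : Int))).sum)]
  unfold FmulL
  simp

theorem Bloop (w : List Int) : ∀ (c0 : Nat) (later : PySem.Dict Int Int) (res : Int),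
    1 ≤ c0 → c0 + 2 ≤ w.length →
    (∀ v, later.getD v 0 = ((w.drop (c0 + 2)).count v : Int)) →
    ((PySem.List.pyRange (c0 : Int) 1 (-1)).foldl (stepB w) (later, res)).2
      = res + ((List.range (c0 - 1)).map (fun i => FmulL w (2 + i))).sum := by
  intro c0
  induction c0 with
  | zero => intro _ _ h1; omega
  | succ m ih =>
    intro later res h1 h2 hlater
    by_cases hm : m = 0
    · subst hm
      rw [PySem.List.pyRange_neg_one_eq_nil (by norm_num)]
      simp
    · have hm1 : 1 ≤ m := by omega
      have hcons : PySem.List.pyRange ((m + 1 : Nat) : Int) 1 (-1) =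
          ((m + 1 : Nat) : Int) :: PySem.List.pyRange ((m : Nat) : Int) 1 (-1) := by
        have e : ((m + 1 : Nat) : Int) - 1 = ((m : Nat) : Int) := by push_cast; ring
        rw [PySem.List.pyRange_neg_one_cons (by omega), e]
      rw [hcons, List.foldl_cons]
      -- evaluate the step at c = m+1
      have hm2 : m + 2 < w.length := by omega
      have ekey : PySem.List.pyGetD w (((m + 1 : Nat) : Int) + 1) 0 = w.getD (m + 2) 0 := by
        have e : (((m + 1 : Nat) : Int) + 1) = ((m + 2 : Nat) : Int) := by push_cast; ring
        rw [e, PySem.List.pyGetD_natCast]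
      have hgd : w.getD (m + 2) 0 = w[m + 2] := List.getD_eq_getElem w 0 hm2
      have hdropc : w.drop (m + 2) = w[m + 2] :: w.drop (m + 3) := List.drop_eq_getElem_cons hm2
      set later' := later.insert (w.getD (m + 2) 0) (later.getD (w.getD (m + 2) 0) 0 + 1)
        with hlater'def
      have hlater' : ∀ v, later'.getD v 0 = ((w.drop (m + 2)).count v : Int) := by
        intro v
        rw [hlater'def, PySem.Dict.getD_insert, hdropc]
        by_cases hv : v = w.getD (m + 2) 0
        · rw [if_pos hv, hlater, hv, hgd, List.count_cons_self]
          rw [show w.drop (m + 3) = w.drop (m + 2 + 1) from rfl]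
          push_cast; ring
        · rw [if_neg hv, hlater]
          rw [List.count_cons_of_ne (by rw [hgd] at hv; exact fun hc => hv hc.symm)]
      have hstep : stepB w (later, res) ((m + 1 : Nat) : Int) =
          (later', res + FmulL w (m + 1)) := by
        simp only [stepB, ekey]
        rw [← hlater'def]
        rw [stepB_res w later' res m hlater']
      rw [hstep]
      rw [ih later' (res + FmulL w (m + 1)) hm1 (by omega) (by
        intro v
        rw [hlater' v, hdropc, List.count_cons])]
      have hr : List.range m = List.range (m - 1) ++ [m - 1] := by
        rw [← List.range_succ]
        congr 1
        omega
      rw [show m + 1 - 1 = m from rfl, hr, List.map_append, List.sum_append]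
      have : 2 + (m - 1) = m + 1 := by omega
      simp [this]
      ring

theorem countB_eq (w : List Int) :
    count_alt w = ((List.range (w.length - 3)).map (fun i => FmulL w (2 + i))).sum := by
  simp only [count_alt]
  by_cases hn : 4 ≤ w.length
  · have e : PySem.List.len w - 2 = ((w.length - 2 : Nat) : Int) := by
      rw [PySem.List.len_eq]; push_cast; omega
    rw [e, Bloop w (w.length - 2) PySem.Dict.empty 0 (by omega) (by omega) (by
      intro v
      rw [show w.length - 2 + 2 = w.length from by omega, List.drop_length]
      simp [PySem.Dict.getD_empty])]
    rw [show w.length - 2 - 1 = w.length - 3 from by omega]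
    ring
  · have hnil : PySem.List.pyRange (PySem.List.len w - 2) 1 (-1) = [] := by
      apply PySem.List.pyRange_neg_one_eq_nil
      rw [PySem.List.len_eq]; omega
    rw [hnil, show w.length - 3 = 0 from by omega]
    simp

theorem sum_flatMap_list {α : Type} (l : List α) (f : α → List Int) :
    (l.flatMap f).sum = (l.map (fun a => (f a).sum)).sum := by
  induction l with
  | nil => simp
  | cons x t ih => simp [ih]

theorem sum_swap_list {α β : Type} (A : List α) (B : List β) (f : α → β → Int) :
    (A.map (fun x => (B.map (f x)).sum)).sum = (B.map (fun y => (A.map (fun x => f x y)).sum)).sum := by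
  induction A with
  | nil => simp
  | cons a t ih =>
    simp only [List.map_cons, List.sum_cons, ih]
    rw [← PySem.List.sum_map_add_int]

theorem keyx (wc : Int) (hwc : wc ≠ 0) (P : List Int) (x : Int) :
    (if PySem.Int.mod x wc = 0 then ((P.count (PySem.Int.floordiv x wc) : Nat) : Int) else 0) =
      (P.map (fun t => if t * wc = x then (1 : Int) else 0)).sum := by
  by_cases hm : PySem.Int.mod x wc = 0
  · have hdvd : wc ∣ x := (PySem.Int.mod_eq_zero_iff_dvd x wc).mp hm
    have hfd : PySem.Int.floordiv x wc * wc = x := by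
      have h := PySem.Int.floordiv_mul_add_mod x wc
      rw [hm] at h
      omega
    rw [if_pos hm, count_int]
    apply congrArg
    apply List.map_congr_left
    intro t _
    by_cases ht : t * wc = x
    · rw [if_pos ht, if_pos (mul_right_cancel₀ hwc (by rw [ht, hfd]))]
    · rw [if_neg ht, if_neg (fun hc => ht (by rw [hc, hfd]))]
  · rw [if_neg hm]
    symm
    apply List.sum_eq_zero
    intro y hy
    obtain ⟨t, _, ht⟩ := List.mem_map.mp hy
    by_cases hx : t * wc = x
    · exfalso
      exact hm ((PySem.Int.mod_eq_zero_iff_dvd x wc).mpr ⟨t, by rw [← hx]; ring⟩)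
    · rw [← ht, if_neg hx]

theorem triangle_step (F : Nat → Nat → Int) (c : Nat) :
    ((List.range (c + 1 - 1)).map (fun a => ((List.range (c + 1 - 1 - a)).map (fun i => F a (a + 1 + i))).sum)).sum =
      ((List.range (c - 1)).map (fun a => ((List.range (c - 1 - a)).map (fun i => F a (a + 1 + i))).sum)).sum +
        ((List.range c).map (fun a => F a c)).sum := by
  cases c with
  | zero => simp
  | succ m =>
    have e1 : m + 1 + 1 - 1 = m + 1 := by omega
    have e2 : m + 1 - 1 = m := by omega
    rw [e1, e2]
    have hsplit : ∀ a ∈ List.range (m + 1),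
        ((List.range (m + 1 - a)).map (fun i => F a (a + 1 + i))).sum =
          ((List.range (m - a)).map (fun i => F a (a + 1 + i))).sum + F a (m + 1) := by
      intro a ha
      have haM : a < m + 1 := List.mem_range.mp ha
      have e : m + 1 - a = (m - a) + 1 := by omega
      rw [e, List.range_succ, List.map_append, List.sum_append]
      have e3 : a + 1 + (m - a) = m + 1 := by omega
      simp [e3]
    rw [List.map_congr_left hsplit, PySem.List.sum_map_add_int]
    congr 1
    rw [List.range_succ, List.map_append, List.sum_append]
    simp

theorem triangle (F : Nat → Nat → Int) : ∀ (c : Nat),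
    ((List.range c).map (fun b => ((List.range b).map (fun a => F a b)).sum)).sum =
      ((List.range (c - 1)).map (fun a => ((List.range (c - 1 - a)).map (fun i => F a (a + 1 + i))).sum)).sum := by
  intro c
  induction c with
  | zero => simp
  | succ c ih =>
    rw [List.range_succ, List.map_append, List.sum_append, ih, triangle_step F c]
    simp

theorem bridge (w : List Int) (c : Nat)
    (hz : w.getD c 0 ≠ 0) : FdivL w c = FmulL w c := by
  unfold FdivL
  rw [List.map_congr_left (fun x _ => keyx (w.getD c 0) hz (pairsL w c) x)]
  rw [sum_swap_list]
  -- inner sums are suffix counts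
  rw [List.map_congr_left (fun t _ => by
    rw [show ((w.drop (c+1)).map (fun x => if t * w.getD c 0 = x then (1:Int) else 0)).sum
        = (((w.drop (c+1)).count (t * w.getD c 0) : Nat) : Int) from by
      rw [count_int]
      apply congrArg
      apply List.map_congr_left
      intro x _
      by_cases hx : x = t * w.getD c 0
      · rw [if_pos hx, if_pos hx.symm]
      · rw [if_neg hx, if_neg (fun hcc => hx hcc.symm)]])]
  -- expand the pairs list
  unfold pairsL
  rw [List.map_flatMap, sum_flatMap_list]
  simp only [List.map_map]
  have := triangle (fun a b => (((w.drop (c+1)).count (w.getD b 0 * w.getD a 0 * w.getD c 0) : Nat) : Int)) c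
  simp only [Function.comp_def] at this ⊢
  rw [this]
  unfold FmulL
  apply congrArg
  apply List.map_congr_left
  intro a _
  apply congrArg
  apply List.map_congr_left
  intro i _
  have : w.getD (a + 1 + i) 0 * w.getD a 0 * w.getD c 0
      = w.getD a 0 * w.getD (a + 1 + i) 0 * w.getD c 0 := by ring
  rw [this]

-- ===== VERDICT (by name: the statement is the Claim_ definition above) =====
theorem count_spec : Claim_equal_count := by
  intro w _ hPre
  unfold Spec_count
  rw [countA_eq, countB_eq]
  apply congrArg
  apply List.map_congr_left
  intro i hi
  simp only [List.mem_range] at hi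
  apply bridge
  intro hz
  have hmem : w.getD (2 + i) 0 ∈ (w.drop 2).dropLast := by
    have hlen : i < ((w.drop 2).dropLast).length := by
      rw [List.length_dropLast, List.length_drop]; omega
    have hel : ((w.drop 2).dropLast)[i] = w.getD (2 + i) 0 := by
      rw [List.getElem_dropLast, List.getElem_drop]
      exact (List.getD_eq_getElem w 0 (by omega)).symm
    rw [← hel]
    exact List.getElem_mem hlen
  exact (hPre _ hmem) hz
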